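-- pv_equiv track=rewrite | github.com/LijianZhao2017/external-patch-handling | utils.py | rewrite_patch_with_stripped_prefix
-- ===== SOURCE A (Python) =====
-- def rewrite_patch_with_stripped_prefix(text: str, prefix: str) -> str:
--     """Rewrite a patch text to strip a leading path prefix from diff headers.
--
--     Only rewrites lines that are actual diff headers (``diff --git``,
--     ``---``, ``+++``) so that commit message bodies are not mangled.
--     """
--     out_lines: list[str] = []
--     for line in text.splitlines(True):
--         if line.startswith(f"diff --git a/{prefix}/"):
--             line = line.replace(f"a/{prefix}/", "a/", 1).replace(f"b/{prefix}/", "b/", 1)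
--         elif line.startswith(f"--- a/{prefix}/"):
--             line = line.replace(f"a/{prefix}/", "a/", 1)
--         elif line.startswith(f"+++ b/{prefix}/"):
--             line = line.replace(f"b/{prefix}/", "b/", 1)
--         out_lines.append(line)
--     return "".join(out_lines)
-- ===== SOURCE B (Python) =====
-- def rewrite_patch_with_stripped_prefix(text: str, prefix: str) -> str:
--     """Single explicit scan over the text; header lines are rewritten by
--     table-driven slicing at known offsets instead of str.replace."""
--     tail = prefix + "/"
--     headers = ("diff --git a/", "--- a/", "+++ b/")
--     out = []
--     i = 0
--     n = len(text)
--     while i < n: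
--         j = i
--         while j < n and text[j] != "\n" and text[j] != "\r":
--             j += 1
--         if j < n:
--             j += 2 if text[j] == "\r" and j + 1 < n and text[j + 1] == "\n" else 1
--         line = text[i:j]
--         for head in headers:
--             if line.startswith(head + tail):
--                 line = head + line[len(head) + len(tail):]
--                 if head == "diff --git a/":
--                     k = line.find("b/" + tail)
--                     if k != -1:
--                         line = line[:k + 2] + line[k + 2 + len(tail):]
--                 break
--         out.append(line)
--         i = j
--     return "".join(out)
-- ===== Notes on version B (the rewrite author's own statement) =====
-- stated objective: alternative
-- what changed: Replaces splitlines + per-branch str.replace with a single explicit index scan over the text and a table-driven header loop that strips the prefix by slicing at known offsets (plus one find for the b/ side of diff lines).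
import Mathlib
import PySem

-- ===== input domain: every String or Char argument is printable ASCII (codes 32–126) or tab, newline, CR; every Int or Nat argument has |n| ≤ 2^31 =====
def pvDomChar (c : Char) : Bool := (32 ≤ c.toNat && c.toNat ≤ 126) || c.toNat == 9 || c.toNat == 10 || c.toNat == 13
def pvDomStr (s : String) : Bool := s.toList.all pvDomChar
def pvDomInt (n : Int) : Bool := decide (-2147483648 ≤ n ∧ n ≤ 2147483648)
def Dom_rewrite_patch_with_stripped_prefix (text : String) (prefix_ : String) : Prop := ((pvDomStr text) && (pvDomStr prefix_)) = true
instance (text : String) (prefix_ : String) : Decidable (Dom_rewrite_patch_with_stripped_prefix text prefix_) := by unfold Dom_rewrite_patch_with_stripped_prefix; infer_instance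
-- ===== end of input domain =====

-- B rewrites the same diff headers with one explicit scan plus table-driven slicing instead of
-- splitlines + per-branch str.replace; objective: alternative (same O(n) cost).

-- Splits off the first line together with its terminator ('\n', '\r' or '\r\n').
-- Exact on Dom: these are the only line terminators Python's splitlines recognises among the
-- admitted characters.  Used by PORT A for text.splitlines(True) and by PORT B for its
-- character-by-character terminator scan (B's inner while loop does exactly this).
def pvBreakLine : List Char → List Char × List Char
  | [] => ([], [])
  | c :: rest =>
    if c = '\n' then ([c], rest)
    else if c = '\r' then
      match rest with
      | '\n' :: rest' => (['\r', '\n'], rest')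
      | rest => (['\r'], rest)
    else
      let p := pvBreakLine rest
      (c :: p.1, p.2)

theorem pvBreakLine_snd_lt (cs : List Char) (h : ¬ cs = []) : (pvBreakLine cs).2.length < cs.length := by
  induction cs with
  | nil => exact absurd rfl h
  | cons c rest ih =>
    simp only [pvBreakLine]
    split
    · simp
    · split
      · split <;> simp
      · by_cases hr : rest = []
        · subst hr; simp [pvBreakLine]
        · have := ih hr
          simpa using Nat.lt_succ_of_lt this

-- ===== PORT A =====

-- the three header literals ("diff --git a/", "--- a/", "+++ b/")
def pvDgH : List Char := ['d','i','f','f',' ','-','-','g','i','t',' ','a','/']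
def pvMmH : List Char := ['-','-','-',' ','a','/']
def pvPpH : List Char := ['+','+','+',' ','b','/']

-- hand port of s.replace(old, new, 1); exact for old ≠ "" (all uses here): replace the
-- first occurrence of old, if any
def pvReplace1 (s old new : List Char) : List Char :=
  let i := PySem.Chars.find s old
  if i = -1 then s else s.take i.toNat ++ new ++ s.drop (i.toNat + old.length)

-- hand port of text.splitlines(True) (keepends); exact on Dom (see pvBreakLine)
def pySplitlinesKeep (cs : List Char) : List (List Char) :=
  if h : cs = [] then []
  else (pvBreakLine cs).1 :: pySplitlinesKeep (pvBreakLine cs).2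
termination_by cs.length
decreasing_by exact pvBreakLine_snd_lt _ h

-- the body of A's for loop: the if/elif chain over one line
def pvLineA (pre line : List Char) : List Char :=
  if PySem.Chars.startswith line (pvDgH ++ pre ++ ['/']) then
    pvReplace1 (pvReplace1 line (['a','/'] ++ pre ++ ['/']) ['a','/']) (['b','/'] ++ pre ++ ['/']) ['b','/']
  else if PySem.Chars.startswith line (pvMmH ++ pre ++ ['/']) then
    pvReplace1 line (['a','/'] ++ pre ++ ['/']) ['a','/']
  else if PySem.Chars.startswith line (pvPpH ++ pre ++ ['/']) then
    pvReplace1 line (['b','/'] ++ pre ++ ['/']) ['b','/']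
  else line

def rewrite_patch_with_stripped_prefix (text : String) (prefix_ : String) : String :=
  String.mk (PySem.Chars.join [] ((pySplitlinesKeep text.toList).map (pvLineA prefix_.toList)))

-- ===== PORT B =====

-- B's inner for-loop over the header table (with break): first matching header wins
def pvGo (pre line : List Char) : List (List Char) → List Char
  | [] => line
  | h :: hs =>
    if PySem.Chars.startswith line (h ++ pre ++ ['/']) then
      let stripped := h ++ line.drop (h.length + (pre.length + 1))
      if h = pvDgH then
        let k := PySem.Chars.find stripped (['b','/'] ++ pre ++ ['/'])
        if k = -1 then stripped
        else stripped.take (k.toNat + 2) ++ stripped.drop (k.toNat + 2 + (pre.length + 1))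
      else stripped
    else pvGo pre line hs

-- B's outer while loop: cut off one line (index scan = pvBreakLine), rewrite it, recurse
def pvProcessB (pre cs : List Char) : List (List Char) :=
  if h : cs = [] then []
  else pvGo pre (pvBreakLine cs).1 [pvDgH, pvMmH, pvPpH] :: pvProcessB pre (pvBreakLine cs).2
termination_by cs.length
decreasing_by exact pvBreakLine_snd_lt _ h

def rewrite_patch_with_stripped_prefix_alt (text : String) (prefix_ : String) : String :=
  String.mk (PySem.Chars.join [] (pvProcessB prefix_.toList text.toList))

-- ===== PRECONDITION & SPEC =====
def Spec_rewrite_patch_with_stripped_prefix (text : String) (prefix_ : String) (out : String) : Prop := out = rewrite_patch_with_stripped_prefix_alt text prefix_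
instance (text : String) (prefix_ : String) (out : String) : Decidable (Spec_rewrite_patch_with_stripped_prefix text prefix_ out) := by unfold Spec_rewrite_patch_with_stripped_prefix; infer_instance

-- ===== CLAIM (what is proved, stated in full; the proofs are below) =====
def Claim_equal_rewrite_patch_with_stripped_prefix : Prop := ∀ (text : String) (prefix_ : String), Dom_rewrite_patch_with_stripped_prefix text prefix_ → Spec_rewrite_patch_with_stripped_prefix text prefix_ (rewrite_patch_with_stripped_prefix text prefix_)

-- ===== LEMMAS AND PROOFS =====

theorem pv_find_eq_of_first (s sub : List Char) (k : Nat) (hk : sub <+: s.drop k)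
    (hmin : ∀ i < k, ¬ sub <+: s.drop i) : PySem.Chars.find s sub = (k : Int) := by
  have hin : PySem.Chars.isIn sub s = true := (PySem.Chars.exists_prefix_drop_iff_isIn sub s).1 ⟨k, hk⟩
  have hnn : 0 ≤ PySem.Chars.find s sub := (PySem.Chars.find_nonneg_iff s sub).2 ((PySem.Chars.isIn_iff_infix sub s).1 hin)
  obtain ⟨h1, h2⟩ := PySem.Chars.find_spec hnn
  have hne : (PySem.Chars.find s sub).toNat = k := by
    rcases lt_trichotomy (PySem.Chars.find s sub).toNat k with h | h | h
    · exact absurd h1 (hmin _ h)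
    · exact h
    · exact absurd hk (h2 k h)
  omega

-- first occurrence of "m/pre/" in "hd0 ++ m/pre/ ++ rest" is right after hd0 when m ∉ hd0
theorem pv_strip_first (hd0 pre rest : List Char) (m : Char) (hno : ∀ c ∈ hd0, c ≠ m) :
    pvReplace1 (hd0 ++ (([m,'/'] ++ pre ++ ['/']) ++ rest)) ([m,'/'] ++ pre ++ ['/']) [m,'/'] =
      hd0 ++ ([m,'/'] ++ rest) := by
  have hfind : PySem.Chars.find (hd0 ++ (([m,'/'] ++ pre ++ ['/']) ++ rest)) ([m,'/'] ++ pre ++ ['/']) = (hd0.length : Int) := by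
    apply pv_find_eq_of_first
    · rw [List.drop_left]
      exact List.prefix_append _ _
    · intro i hi hcon
      have hdrop : (hd0 ++ (([m,'/'] ++ pre ++ ['/']) ++ rest)).drop i
          = hd0[i] :: (hd0.drop (i+1) ++ (([m,'/'] ++ pre ++ ['/']) ++ rest)) := by
        rw [List.drop_append_of_le_length (Nat.le_of_lt hi), ← List.getElem_cons_drop (as := hd0) (i := i) (h := hi)]
        rfl
      rw [hdrop] at hcon
      have hm : m = hd0[i] := (List.cons_prefix_cons.1 (by simpa using hcon)).1
      exact hno _ (List.getElem_mem _) hm.symm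
  unfold pvReplace1
  rw [hfind]
  have hne : ¬ ((hd0.length : Int) = -1) := by omega
  simp only [hne, if_false, Int.toNat_natCast]
  rw [show hd0.length + ([m,'/'] ++ pre ++ ['/']).length = (hd0 ++ ([m,'/'] ++ pre ++ ['/'])).length by simp]
  rw [List.take_left, show hd0 ++ (([m,'/'] ++ pre ++ ['/']) ++ rest) = (hd0 ++ ([m,'/'] ++ pre ++ ['/'])) ++ rest by simp,
      List.drop_left]
  simp

-- replace-first of "b/pre/" by "b/" = find + slicing splice
theorem pv_bsplice (pre s : List Char) :
    pvReplace1 s (['b','/'] ++ pre ++ ['/']) ['b','/'] =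
      (let k := PySem.Chars.find s (['b','/'] ++ pre ++ ['/']);
       if k = -1 then s else s.take (k.toNat + 2) ++ s.drop (k.toNat + 2 + (pre.length + 1))) := by
  unfold pvReplace1
  simp only [List.cons_append, List.nil_append, List.append_assoc]
  set f := PySem.Chars.find s ('b' :: '/' :: (pre ++ ['/'])) with hf
  by_cases h : f = -1
  · simp [h]
  · have hnn : 0 ≤ f := by
      have := PySem.Chars.neg_one_le_find s ('b' :: '/' :: (pre ++ ['/']))
      omega
    obtain ⟨hpre, -⟩ := PySem.Chars.find_spec hnn
    obtain ⟨u, hu⟩ := hpre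
    simp only [h, if_false]
    have htake : s.take (f.toNat + 2) = s.take f.toNat ++ ['b','/'] := by
      rw [List.take_add]
      congr 1
      rw [← hu]
      rfl
    have hidx : f.toNat + ('b' :: '/' :: (pre ++ ['/'])).length = f.toNat + 2 + (pre.length + 1) := by
      simp
      omega
    rw [htake, hidx]
    simp

set_option maxRecDepth 8000 in
theorem pv_lineAB (pre line : List Char) : pvLineA pre line = pvGo pre line [pvDgH, pvMmH, pvPpH] := by
  unfold pvLineA
  simp only [pvGo]
  cases hb1 : PySem.Chars.startswith line (pvDgH ++ pre ++ ['/']) with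
  | true =>
    obtain ⟨rest, rfl⟩ := (PySem.Chars.startswith_iff line (pvDgH ++ pre ++ ['/'])).1 hb1
    simp only [if_true]
    rw [show (pvDgH ++ pre ++ ['/']) ++ rest
        = ['d','i','f','f',' ','-','-','g','i','t',' '] ++ ((['a','/'] ++ pre ++ ['/']) ++ rest) by
      simp only [pvDgH, List.append_assoc, List.cons_append, List.nil_append]]
    rw [pv_strip_first ['d','i','f','f',' ','-','-','g','i','t',' '] pre rest 'a' (by intro c hc heq; subst heq; simp at hc), pv_bsplice]
    rw [show pvDgH.length + (pre.length + 1) = (pvDgH ++ pre ++ ['/']).length by simp]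
    rw [show (['d','i','f','f',' ','-','-','g','i','t',' '] ++ ((['a','/'] ++ pre ++ ['/']) ++ rest))
        = (pvDgH ++ pre ++ ['/']) ++ rest by
      simp only [pvDgH, List.append_assoc, List.cons_append, List.nil_append]]
    rw [List.drop_left]
    rw [show ['d','i','f','f',' ','-','-','g','i','t',' '] ++ (['a','/'] ++ rest) = pvDgH ++ rest by
      simp only [pvDgH, List.append_assoc, List.cons_append, List.nil_append]]
  | false =>
    simp only [Bool.false_eq_true, if_false]
    cases hb2 : PySem.Chars.startswith line (pvMmH ++ pre ++ ['/']) with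
    | true =>
      obtain ⟨rest, rfl⟩ := (PySem.Chars.startswith_iff line (pvMmH ++ pre ++ ['/'])).1 hb2
      simp only [if_true, eq_false (show ¬ pvMmH = pvDgH by simp [pvMmH, pvDgH]), if_false]
      rw [show (pvMmH ++ pre ++ ['/']) ++ rest
          = ['-','-','-',' '] ++ ((['a','/'] ++ pre ++ ['/']) ++ rest) by
        simp only [pvMmH, List.append_assoc, List.cons_append, List.nil_append]]
      rw [pv_strip_first ['-','-','-',' '] pre rest 'a' (by intro c hc heq; subst heq; simp at hc)]
      rw [show pvMmH.length + (pre.length + 1) = (pvMmH ++ pre ++ ['/']).length by simp]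
      rw [show (['-','-','-',' '] ++ ((['a','/'] ++ pre ++ ['/']) ++ rest))
          = (pvMmH ++ pre ++ ['/']) ++ rest by
        simp only [pvMmH, List.append_assoc, List.cons_append, List.nil_append]]
      rw [List.drop_left]
      simp only [pvMmH, List.append_assoc, List.cons_append, List.nil_append]
    | false =>
      simp only [Bool.false_eq_true, if_false]
      cases hb3 : PySem.Chars.startswith line (pvPpH ++ pre ++ ['/']) with
      | true =>
        obtain ⟨rest, rfl⟩ := (PySem.Chars.startswith_iff line (pvPpH ++ pre ++ ['/'])).1 hb3
        simp only [if_true, eq_false (show ¬ pvPpH = pvDgH by simp [pvPpH, pvDgH]), if_false]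
        rw [show (pvPpH ++ pre ++ ['/']) ++ rest
            = ['+','+','+',' '] ++ ((['b','/'] ++ pre ++ ['/']) ++ rest) by
          simp only [pvPpH, List.append_assoc, List.cons_append, List.nil_append]]
        rw [pv_strip_first ['+','+','+',' '] pre rest 'b' (by intro c hc heq; subst heq; simp at hc)]
        rw [show pvPpH.length + (pre.length + 1) = (pvPpH ++ pre ++ ['/']).length by simp]
        rw [show (['+','+','+',' '] ++ ((['b','/'] ++ pre ++ ['/']) ++ rest))
            = (pvPpH ++ pre ++ ['/']) ++ rest by
          simp only [pvPpH, List.append_assoc, List.cons_append, List.nil_append]]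
        rw [List.drop_left]
        simp only [pvPpH, List.append_assoc, List.cons_append, List.nil_append]
      | false =>
        simp only [Bool.false_eq_true, if_false]

theorem pv_processB_eq (pre cs : List Char) :
    pvProcessB pre cs = (pySplitlinesKeep cs).map (fun l => pvGo pre l [pvDgH, pvMmH, pvPpH]) := by
  rw [pvProcessB, pySplitlinesKeep]
  by_cases h : cs = []
  · simp [h]
  · simp only [h, dif_neg, not_false_iff, List.map_cons]
    rw [pv_processB_eq pre (pvBreakLine cs).2]
termination_by cs.length
decreasing_by exact pvBreakLine_snd_lt _ h

-- ===== VERDICT (by name: the statement is the Claim_ definition above) =====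
theorem rewrite_patch_with_stripped_prefix_spec : Claim_equal_rewrite_patch_with_stripped_prefix := by
  intro text prefix_ _
  unfold Spec_rewrite_patch_with_stripped_prefix rewrite_patch_with_stripped_prefix rewrite_patch_with_stripped_prefix_alt
  rw [pv_processB_eq]
  exact congrArg (fun l => String.mk (PySem.Chars.join [] l)) (List.map_congr_left (fun l _ => pv_lineAB _ l))
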